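-- pv_equiv track=rewrite | github.com/Usagi-App/parser | scripts/build_catalog.py | infer_nsfw
-- ===== SOURCE A (Python) =====
-- def infer_nsfw(text: str, title: str, path: str, domains: list[str]) -> bool:
--     haystack = ' '.join(
--         [
--             text,
--             title,
--             path,
--             *domains,
--         ]
--     ).lower()
--
--     nsfw_markers = [
--         'nsfw',
--         '18+',
--         'adult',
--         'hentai',
--         'ecchi',
--         'porn',
--         'xxx',
--     ]
--
--     return any(marker in haystack for marker in nsfw_markers)
-- ===== SOURCE B (Python) =====
-- def infer_nsfw(text: str, title: str, path: str, domains: list[str]) -> bool: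
--     haystack = ' '.join([text, title, path, *domains]).lower()
--     markers = ('nsfw', '18+', 'adult', 'hentai', 'ecchi', 'porn', 'xxx')
--     # single left-to-right pass: at each position test whether any marker starts there
--     for i in range(len(haystack)):
--         for m in markers:
--             if haystack.startswith(m, i):
--                 return True
--     return False
-- ===== Notes on version B (the rewrite author's own statement) =====
-- stated objective: alternative
-- what changed: Replaces seven independent whole-string substring scans (any(marker in haystack)) with a single left-to-right pass over positions that tests each marker via startswith at the current position.
import Mathlib
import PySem

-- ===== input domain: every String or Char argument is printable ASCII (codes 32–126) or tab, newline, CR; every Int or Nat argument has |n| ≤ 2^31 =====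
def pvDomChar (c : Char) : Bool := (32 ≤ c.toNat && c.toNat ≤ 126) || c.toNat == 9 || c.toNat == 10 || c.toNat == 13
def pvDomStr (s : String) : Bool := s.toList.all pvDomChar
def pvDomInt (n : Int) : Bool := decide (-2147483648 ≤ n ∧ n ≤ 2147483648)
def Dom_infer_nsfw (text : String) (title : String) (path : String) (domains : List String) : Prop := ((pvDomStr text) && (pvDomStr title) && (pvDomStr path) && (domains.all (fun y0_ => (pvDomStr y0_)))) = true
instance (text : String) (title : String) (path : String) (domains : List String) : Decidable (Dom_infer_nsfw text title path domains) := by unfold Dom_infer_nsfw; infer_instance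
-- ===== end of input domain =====

-- B replaces seven independent whole-string substring scans with one left-to-right
-- pass testing every marker at each position (alternative decomposition, same cost).

-- ===== PORT A =====
def pvMarkers : List String := ["nsfw", "18+", "adult", "hentai", "ecchi", "porn", "xxx"]

def infer_nsfw (text : String) (title : String) (path : String) (domains : List String) : Bool :=
  let haystack := PySem.Str.lower (PySem.Str.join " " ([text, title, path] ++ domains))
  pvMarkers.any (fun marker => PySem.Str.isIn marker haystack)

-- ===== PORT B =====
-- one pass over the haystack's positions; at each position test every marker as a prefix
def pvScan (markers : List (List Char)) : List Char → Bool
  | [] => false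
  | c :: rest =>
    markers.any (fun m => PySem.Chars.startswith (c :: rest) m) || pvScan markers rest

def infer_nsfw_alt (text : String) (title : String) (path : String) (domains : List String) : Bool :=
  let haystack := PySem.Str.lower (PySem.Str.join " " ([text, title, path] ++ domains))
  pvScan (pvMarkers.map String.toList) haystack.toList

-- ===== PRECONDITION & SPEC =====
def Spec_infer_nsfw (text : String) (title : String) (path : String) (domains : List String) (out : Bool) : Prop := out = infer_nsfw_alt text title path domains
instance (text : String) (title : String) (path : String) (domains : List String) (out : Bool) : Decidable (Spec_infer_nsfw text title path domains out) := by unfold Spec_infer_nsfw; infer_instance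

-- ===== CLAIM (what is proved, stated in full; the proofs are below) =====
def Claim_equal_infer_nsfw : Prop := ∀ (text : String) (title : String) (path : String) (domains : List String), Dom_infer_nsfw text title path domains → Spec_infer_nsfw text title path domains (infer_nsfw text title path domains)

-- ===== LEMMAS AND PROOFS =====

-- the position scan decides exactly substring membership, for nonempty patterns
theorem pvScan_eq_any_isIn (markers : List (List Char)) (h : ∀ m ∈ markers, m ≠ [])
    (l : List Char) :
    pvScan markers l = markers.any (fun m => PySem.Chars.isIn m l) := by
  induction l with
  | nil =>
    rw [pvScan, eq_comm, List.any_eq_false]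
    intro m hm
    simp only [Bool.eq_false_iff, PySem.Chars.isIn_iff_infix, List.infix_nil]
    exact h m hm
  | cons c rest ih =>
    rw [pvScan, ih, Bool.eq_iff_iff]
    simp only [Bool.or_eq_true, List.any_eq_true, PySem.Chars.isIn_iff_infix,
      PySem.Chars.startswith_iff, List.infix_cons_iff]
    constructor
    · rintro (⟨m, hm, hs⟩ | ⟨m, hm, hs⟩)
      · exact ⟨m, hm, Or.inl hs⟩
      · exact ⟨m, hm, Or.inr hs⟩
    · rintro ⟨m, hm, hs | hs⟩
      · exact Or.inl ⟨m, hm, hs⟩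
      · exact Or.inr ⟨m, hm, hs⟩

-- ===== VERDICT (by name: the statement is the Claim_ definition above) =====
theorem infer_nsfw_spec : Claim_equal_infer_nsfw := by
  intro text title path domains _
  unfold Spec_infer_nsfw infer_nsfw infer_nsfw_alt
  rw [pvScan_eq_any_isIn _ (by decide)]
  rw [List.any_map]
  simp only [Function.comp_def, PySem.Str.isIn_eq]
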